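-- pv_equiv track=rewrite | github.com/floww-cpu/Pro | src/prometheus/unparser.py | _pretty_print
-- ===== SOURCE A (Python) =====
-- def _pretty_print(code):
--     """Simple pretty printer that indents control structures"""
--     indent = 0
--     formatted = []
--     tokens = []
--     current = ''
--     for ch in code:
--         if ch in '(){}[];,' or ch.isspace():
--             if current:
--                 tokens.append(current)
--                 current = ''
--             if ch.strip():
--                 tokens.append(ch)
--         else:
--             current += ch
--     if current:
--         tokens.append(current)
--
--     i = 0
--     while i < len(tokens):
--         tok = tokens[i]
--         if tok in ('then', 'do', '{'):
--             formatted.append('    ' * indent + tok)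
--             formatted.append('\n')
--             indent += 1
--         elif tok == 'function':
--             formatted.append('    ' * indent + tok + ' ')
--         elif tok in ('end', '}', 'until'):
--             indent = max(0, indent - 1)
--             formatted.append('    ' * indent + tok)
--             formatted.append('\n')
--         else:
--             formatted.append('    ' * indent + tok)
--             formatted.append('\n')
--         i += 1
--
--     return ''.join(formatted)
-- ===== SOURCE B (Python) =====
-- def _pretty_print(code):
--     """Simple pretty printer that indents control structures.
--     Single streaming pass: no intermediate token list is built."""
--     indent = 0
--     out = []
--     current = ''
--
--     def emit(tok):
--         nonlocal indent
--         if tok in ('then', 'do', '{'):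
--             out.append('    ' * indent + tok + '\n')
--             indent += 1
--         elif tok == 'function':
--             out.append('    ' * indent + tok + ' ')
--         elif tok in ('end', '}', 'until'):
--             indent = max(0, indent - 1)
--             out.append('    ' * indent + tok + '\n')
--         else:
--             out.append('    ' * indent + tok + '\n')
--
--     for ch in code:
--         if ch in '(){}[];,':
--             if current:
--                 emit(current)
--                 current = ''
--             emit(ch)
--         elif ch.isspace():
--             if current:
--                 emit(current)
--                 current = ''
--         else:
--             current += ch
--     if current:
--         emit(current)
--     return ''.join(out)
-- ===== Notes on version B (the rewrite author's own statement) =====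
-- stated objective: simpler
-- what changed: Fuses A's two sequential phases (tokenize into a list, then format the list) into one streaming pass over the characters that emits formatted output the moment a token is completed, so no token list is ever materialized.
import Mathlib
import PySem

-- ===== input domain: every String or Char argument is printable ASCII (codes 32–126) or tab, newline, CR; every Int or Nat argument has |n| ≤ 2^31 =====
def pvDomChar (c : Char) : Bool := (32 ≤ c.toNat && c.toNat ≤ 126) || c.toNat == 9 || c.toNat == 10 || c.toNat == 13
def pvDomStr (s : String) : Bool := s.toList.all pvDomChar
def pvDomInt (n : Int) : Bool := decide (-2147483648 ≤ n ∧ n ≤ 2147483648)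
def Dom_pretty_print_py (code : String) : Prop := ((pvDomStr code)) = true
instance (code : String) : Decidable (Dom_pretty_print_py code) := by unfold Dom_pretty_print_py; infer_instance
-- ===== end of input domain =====

-- B fuses A's two phases (tokenize to a list, then format the list) into one
-- streaming pass that formats each token as soon as it is completed (simpler;
-- no token list is materialized).  Both ports work over List Char.

-- ===== PORT A =====
-- ch in '(){}[];,'
def pvDelim (c : Char) : Bool :=
  c == '(' || c == ')' || c == '{' || c == '}' || c == '[' || c == ']' || c == ';' || c == ','

-- '    ' * indent  (Python: negative repeat gives '', matched by Int.toNat)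
def pvPad (indent : Int) : List Char :=
  (List.replicate indent.toNat [' ', ' ', ' ', ' ']).flatten

-- the body of A's tokenizing for-loop; state = (tokens, current)
def pvTokStep (st : List (List Char) × List Char) (ch : Char) :
    List (List Char) × List Char :=
  if pvDelim ch || PySem.Chars.isspace ch then
    let toks := if st.2 ≠ [] then st.1 ++ [st.2] else st.1
    -- 'if ch.strip():' — a single char strips to nonempty iff it is not whitespace
    let toks := if !PySem.Chars.isspace ch then toks ++ [[ch]] else toks
    (toks, [])
  else (st.1, st.2 ++ [ch])

-- the body of A's while-loop over tokens; state = (indent, formatted)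
def pvFmtStep (st : Int × List (List Char)) (tok : List Char) :
    Int × List (List Char) :=
  if tok = "then".toList ∨ tok = "do".toList ∨ tok = "{".toList then
    (st.1 + 1, st.2 ++ [pvPad st.1 ++ tok, ['\n']])
  else if tok = "function".toList then
    (st.1, st.2 ++ [pvPad st.1 ++ tok ++ [' ']])
  else if tok = "end".toList ∨ tok = "}".toList ∨ tok = "until".toList then
    let i := max 0 (st.1 - 1)
    (i, st.2 ++ [pvPad i ++ tok, ['\n']])
  else
    (st.1, st.2 ++ [pvPad st.1 ++ tok, ['\n']])

def pretty_print_py (code : String) : String :=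
  let t := code.toList.foldl pvTokStep ([], [])
  let tokens := if t.2 ≠ [] then t.1 ++ [t.2] else t.1
  let r := tokens.foldl pvFmtStep (0, [])
  String.ofList r.2.flatten

-- ===== PORT B =====
-- B's emit(tok): format one completed token directly onto the output string
def pvEmit (st : Int × List Char) (tok : List Char) : Int × List Char :=
  if tok = "then".toList ∨ tok = "do".toList ∨ tok = "{".toList then
    (st.1 + 1, st.2 ++ pvPad st.1 ++ tok ++ ['\n'])
  else if tok = "function".toList then
    (st.1, st.2 ++ pvPad st.1 ++ tok ++ [' '])
  else if tok = "end".toList ∨ tok = "}".toList ∨ tok = "until".toList then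
    let i := max 0 (st.1 - 1)
    (i, st.2 ++ pvPad i ++ tok ++ ['\n'])
  else
    (st.1, st.2 ++ pvPad st.1 ++ tok ++ ['\n'])

-- the body of B's single streaming loop; state = ((indent, out), current)
def pvStepB (st : (Int × List Char) × List Char) (ch : Char) :
    (Int × List Char) × List Char :=
  if pvDelim ch then
    (pvEmit (if st.2 ≠ [] then pvEmit st.1 st.2 else st.1) [ch], [])
  else if PySem.Chars.isspace ch then
    ((if st.2 ≠ [] then pvEmit st.1 st.2 else st.1), [])
  else (st.1, st.2 ++ [ch])

def pretty_print_py_alt (code : String) : String :=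
  let r := code.toList.foldl pvStepB ((0, []), [])
  String.ofList (if r.2 ≠ [] then pvEmit r.1 r.2 else r.1).2

-- ===== PRECONDITION & SPEC =====
def Spec_pretty_print_py (code : String) (out : String) : Prop := out = pretty_print_py_alt code
instance (code : String) (out : String) : Decidable (Spec_pretty_print_py code out) := by unfold Spec_pretty_print_py; infer_instance

-- ===== CLAIM (what is proved, stated in full; the proofs are below) =====
def Claim_equal_pretty_print_py : Prop := ∀ (code : String), Dom_pretty_print_py code → Spec_pretty_print_py code (pretty_print_py code)

-- ===== LEMMAS AND PROOFS =====

-- a delimiter character is never whitespace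
theorem pvDelim_not_space (c : Char) (h : pvDelim c = true) :
    PySem.Chars.isspace c = false := by
  unfold pvDelim at h
  simp only [Bool.or_eq_true, beq_iff_eq] at h
  rcases h with ((((((h | h) | h) | h) | h) | h) | h) | h <;> subst h <;> decide

-- one emit step of B equals one formatting step of A, through flattening
theorem pvEmit_fmt (i : Int) (fs : List (List Char)) (tok : List Char) :
    pvEmit (i, fs.flatten) tok
      = ((pvFmtStep (i, fs) tok).1, (pvFmtStep (i, fs) tok).2.flatten) := by
  unfold pvEmit pvFmtStep
  split_ifs <;> simp

-- folded version of pvEmit_fmt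
theorem pvEmit_fold (toks : List (List Char)) (i : Int) (fs : List (List Char)) :
    List.foldl pvEmit (i, fs.flatten) toks
      = ((List.foldl pvFmtStep (i, fs) toks).1,
         (List.foldl pvFmtStep (i, fs) toks).2.flatten) := by
  induction toks generalizing i fs with
  | nil => simp
  | cons t ts ih =>
      simp only [List.foldl_cons, pvEmit_fmt]
      exact ih _ _

-- A's tokenizer step only ever appends to the token list
theorem pvTokStep_shift (ts : List (List Char)) (cur : List Char) (c : Char) :
    pvTokStep (ts, cur) c
      = (ts ++ (pvTokStep ([], cur) c).1, (pvTokStep ([], cur) c).2) := by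
  unfold pvTokStep
  split_ifs <;> simp

-- hence the accumulated token list is prefix-independent
theorem pvTok_prefix (cs : List Char) (ts : List (List Char)) (cur : List Char) :
    List.foldl pvTokStep (ts, cur) cs
      = (ts ++ (List.foldl pvTokStep ([], cur) cs).1,
         (List.foldl pvTokStep ([], cur) cs).2) := by
  induction cs generalizing ts cur with
  | nil => simp
  | cons c cs ih =>
      rcases hp : pvTokStep ([], cur) c with ⟨t1, c1⟩
      simp only [List.foldl_cons, pvTokStep_shift, hp]
      rw [ih (ts ++ t1) c1, ih t1 c1, List.append_assoc]

-- one step of B's fused loop = tokenizer step followed by emitting the new tokens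
theorem pvStepB_tok (s : Int × List Char) (cur : List Char) (c : Char) :
    pvStepB (s, cur) c
      = (List.foldl pvEmit s (pvTokStep ([], cur) c).1, (pvTokStep ([], cur) c).2) := by
  unfold pvStepB pvTokStep
  by_cases hd : pvDelim c = true
  · have hns := pvDelim_not_space c hd
    by_cases hc : cur = []
    · subst hc; simp [hd, hns, List.foldl]
    · simp [hd, hns, hc, List.foldl]
  · by_cases hs : PySem.Chars.isspace c = true
    · by_cases hc : cur = []
      · subst hc; simp [hd, hs]
      · simp [hd, hs, hc, List.foldl]
    · simp [hd, hs]

-- FUSION: B's single pass equals A's tokenize phase composed with emitting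
theorem pvFusion (cs : List Char) (s : Int × List Char) (cur : List Char) :
    List.foldl pvStepB (s, cur) cs
      = (List.foldl pvEmit s (List.foldl pvTokStep ([], cur) cs).1,
         (List.foldl pvTokStep ([], cur) cs).2) := by
  induction cs generalizing s cur with
  | nil => simp
  | cons c cs ih =>
      rcases hp : pvTokStep ([], cur) c with ⟨t1, c1⟩
      simp only [List.foldl_cons, pvStepB_tok, hp]
      rw [ih, pvTok_prefix cs t1 c1, List.foldl_append]

-- ===== VERDICT (by name: the statement is the Claim_ definition above) =====
theorem pretty_print_py_spec : Claim_equal_pretty_print_py := by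
  intro code _
  show pretty_print_py code = pretty_print_py_alt code
  unfold pretty_print_py pretty_print_py_alt
  rw [pvFusion]
  rcases h : List.foldl pvTokStep ([], []) code.toList with ⟨toks, cur⟩
  by_cases hc : cur ≠ []
  · simp only [if_pos hc]
    have := pvEmit_fold (toks ++ [cur]) 0 []
    simp only [List.flatten_nil, List.foldl_append, List.foldl_cons,
      List.foldl_nil] at this
    simp [this]
  · simp only [if_neg hc]
    have := pvEmit_fold toks 0 []
    simp only [List.flatten_nil] at this
    simp [this]
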